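-- pv_equiv track=rewrite | github.com/axxsxbxx/algorithm-solving | Programmers/불량사용자.py | is_ban
-- ===== SOURCE A (Python) =====
-- def is_ban(user, banned):
--     for i in range(len(banned)):
--         length = len(banned[i])
--         # 길이가 다르면 무조건 해당 안됨
--         if len(user[i]) != length:
--             return False
--         # 마스킹된 곳 제외하고 동일한지 여부 비교
--         for j in range(length):
--             if banned[i][j] == '*':
--                 continue
--             if banned[i][j] != user[i][j]:
--                 return False
--     return True
-- ===== SOURCE B (Python) =====
-- def is_ban(user, banned):
--     # Segment-matching strategy: split each pattern on '*' into literal segments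
--     # and verify the same-length user ID carries each segment at its fixed offset.
--     for i in range(len(banned)):
--         pat, uid = banned[i], user[i]
--         if len(uid) != len(pat):
--             return False
--         pos = 0
--         for seg in pat.split('*'):
--             if uid[pos:pos + len(seg)] != seg:
--                 return False
--             pos += len(seg) + 1
--     return True
-- ===== Notes on version B (the rewrite author's own statement) =====
-- stated objective: alternative
-- what changed: Replaces A's per-character wildcard comparison with early returns by splitting each banned pattern on '*' into literal segments and checking, after the length test, that the user ID carries each segment at its fixed offset via slice comparison.
import Mathlib
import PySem

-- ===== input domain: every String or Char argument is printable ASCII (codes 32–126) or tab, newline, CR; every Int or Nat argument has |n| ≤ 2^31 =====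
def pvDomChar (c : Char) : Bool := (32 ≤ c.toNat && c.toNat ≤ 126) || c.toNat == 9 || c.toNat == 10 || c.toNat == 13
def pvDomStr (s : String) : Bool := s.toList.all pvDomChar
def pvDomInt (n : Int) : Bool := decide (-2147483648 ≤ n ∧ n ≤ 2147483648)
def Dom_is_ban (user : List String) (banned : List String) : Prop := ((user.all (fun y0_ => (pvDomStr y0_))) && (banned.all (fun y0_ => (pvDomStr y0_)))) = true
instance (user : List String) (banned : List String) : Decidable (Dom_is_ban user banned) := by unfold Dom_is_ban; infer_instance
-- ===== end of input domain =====

-- B replaces A's per-character wildcard comparison by a segment-matching strategy: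
-- split each pattern on '*' into literal segments and check that the same-length
-- user ID carries each segment at its fixed offset (objective: alternative; same cost).

-- ===== PORT A =====
-- inner loop: `for j in range(length)` with continue/early-return; indices j are always
-- in range on inputs satisfying Pre_, so List.getD is exact there
def aInner (b u : List Char) (len j : Nat) : Bool :=
  if _h : j < len then
    if b.getD j ' ' = '*' then aInner b u len (j+1)
    else if b.getD j ' ' ≠ u.getD j ' ' then false
    else aInner b u len (j+1)
  else true
termination_by len - j

-- outer loop: `for i in range(len(banned))`; user[i] raises IndexError in Python when
-- i ≥ len(user) — those inputs are excluded by Pre_, where getD is exact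
def aOuter (user banned : List String) (n i : Nat) : Bool :=
  if _h : i < n then
    let bi := (banned.getD i "").toList
    let ui := (user.getD i "").toList
    if ui.length ≠ bi.length then false
    else if aInner bi ui bi.length 0 then aOuter user banned n (i+1) else false
  else true
termination_by n - i

def is_ban (user : List String) (banned : List String) : Bool :=
  aOuter user banned banned.length 0

-- ===== PORT B =====
-- `for seg in pat.split('*'): if uid[pos:pos+len(seg)] != seg: return False; pos += len(seg)+1`
-- pat.split('*') is ported as List.splitOn '*' (exact for a one-char separator);
-- the slice uid[pos:pos+len(seg)] is PySem.List.slice (exact Python slicing)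
def bSegLoop (uid : List Char) (segs : List (List Char)) (pos : Nat) : Bool :=
  match segs with
  | [] => true
  | seg :: rest =>
      if PySem.List.slice uid (some (pos : Int)) (some ((pos : Int) + (seg.length : Int))) ≠ seg
      then false
      else bSegLoop uid rest (pos + seg.length + 1)

-- outer loop of B (same indexing as A: user[i] raises outside Pre_, getD exact inside)
def bOuter (user banned : List String) (n i : Nat) : Bool :=
  if _h : i < n then
    let pat := (banned.getD i "").toList
    let uid := (user.getD i "").toList
    if uid.length ≠ pat.length then false
    else if bSegLoop uid (pat.splitOn '*') 0 then bOuter user banned n (i+1) else false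
  else true
termination_by n - i

def is_ban_alt (user : List String) (banned : List String) : Bool :=
  bOuter user banned banned.length 0

-- ===== PRECONDITION & SPEC =====
-- pair k "matches": equal lengths and every non-'*' pattern char equals the user char
def pairOK (b u : List Char) : Prop :=
  b.length = u.length ∧ ∀ j < b.length, b.getD j ' ' = '*' ∨ b.getD j ' ' = u.getD j ' '

-- Pre_ = exactly the inputs on which Python A returns (A raises IndexError on user[i]
-- iff banned is longer than user and every pair up to len(user) matches)
def Pre_is_ban (user : List String) (banned : List String) : Prop :=
  banned.length ≤ user.length ∨
    ∃ k < user.length, ¬ pairOK (banned.getD k "").toList ((user.getD k "").toList)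

instance (user : List String) (banned : List String) : Decidable (Pre_is_ban user banned) := by
  unfold Pre_is_ban pairOK; infer_instance

def pvWitness_is_ban : List String × List String := (["ab"], ["a*"])

def Spec_is_ban (user : List String) (banned : List String) (out : Bool) : Prop := out = is_ban_alt user banned
instance (user : List String) (banned : List String) (out : Bool) : Decidable (Spec_is_ban user banned out) := by unfold Spec_is_ban; infer_instance

-- ===== CLAIM (what is proved, stated in full; the proofs are below) =====
def Claim_equal_is_ban : Prop := ∀ (user : List String) (banned : List String), Dom_is_ban user banned → Pre_is_ban user banned → Spec_is_ban user banned (is_ban user banned)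

-- ===== LEMMAS AND PROOFS =====

theorem aInner_iff (b u : List Char) (len : Nat) : ∀ j,
    aInner b u len j = true ↔
      ∀ k, j ≤ k → k < len → (b.getD k ' ' = '*' ∨ b.getD k ' ' = u.getD k ' ') := by
  suffices H : ∀ m j, len - j ≤ m →
      (aInner b u len j = true ↔
        ∀ k, j ≤ k → k < len → (b.getD k ' ' = '*' ∨ b.getD k ' ' = u.getD k ' ')) by
    intro j; exact H (len - j) j (Nat.le_refl _)
  intro m
  induction m with
  | zero =>
      intro j hm
      have h : ¬ j < len := by omega
      rw [aInner, dif_neg h]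
      simp only [true_iff]
      intro k hjk hk; omega
  | succ m ih =>
      intro j hm
      by_cases h : j < len
      · rw [aInner, dif_pos h]
        by_cases hstar : b.getD j ' ' = '*'
        · rw [if_pos hstar, ih (j+1) (by omega)]
          constructor
          · intro H k hjk hk
            rcases Nat.eq_or_lt_of_le hjk with rfl | hlt
            · exact Or.inl hstar
            · exact H k hlt hk
          · intro H k hjk hk; exact H k (Nat.le_of_succ_le hjk) hk
        · by_cases hne : b.getD j ' ' ≠ u.getD j ' '
          · rw [if_neg hstar, if_pos hne]
            simp only [Bool.false_eq_true, false_iff, not_forall]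
            exact ⟨j, Nat.le_refl j, h, by tauto⟩
          · rw [if_neg hstar, if_neg hne, ih (j+1) (by omega)]
            push_neg at hne
            constructor
            · intro H k hjk hk
              rcases Nat.eq_or_lt_of_le hjk with rfl | hlt
              · exact Or.inr hne
              · exact H k hlt hk
            · intro H k hjk hk; exact H k (Nat.le_of_succ_le hjk) hk
      · rw [aInner, dif_neg h]
        simp only [true_iff]
        intro k hjk hk; omega

theorem segLoop_iff (u : List Char) : ∀ (b : List Char) (pos : Nat),
    pos + b.length = u.length →
    (bSegLoop u (b.splitOn '*') pos = true ↔
      ∀ j < b.length, b.getD j ' ' = '*' ∨ b.getD j ' ' = u.getD (pos + j) ' ') := by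
  intro b
  induction b with
  | nil =>
      intro pos h
      rw [List.splitOn_nil]
      unfold bSegLoop
      rw [PySem.List.slice_natCast_add]
      simp [bSegLoop]
  | cons c cs ih =>
      intro pos h
      simp only [List.length_cons] at h
      by_cases hc : c = '*'
      · subst hc
        rw [show ('*' :: cs).splitOn '*' = [] :: cs.splitOn '*' by
          simp [List.splitOn, List.splitOnP_cons]]
        unfold bSegLoop
        rw [PySem.List.slice_natCast_add]
        simp only [List.length_nil, List.take_zero, ne_eq, not_true_eq_false, if_false,
          Nat.add_zero]
        rw [ih (pos + 1) (by omega)]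
        constructor
        · intro H j hj
          cases j with
          | zero => simp
          | succ k =>
              simp only [List.getD_cons_succ]
              have := H k (by simpa using hj)
              simpa [Nat.add_comm, Nat.add_left_comm, Nat.add_assoc] using this
        · intro H k hk
          have := H (k+1) (by simpa using Nat.succ_lt_succ hk)
          simp only [List.getD_cons_succ] at this
          simpa [Nat.add_comm, Nat.add_left_comm, Nat.add_assoc] using this
      · obtain ⟨s, ss, hr⟩ := List.exists_cons_of_ne_nil (List.splitOnP_ne_nil (· == '*') cs)
        rw [show (c :: cs).splitOn '*' = (c :: s) :: ss by
          simp [List.splitOn, List.splitOnP_cons, hc]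
          rw [show cs.splitOnP (· == '*') = s :: ss from hr]
          rfl]
        have hpos : pos < u.length := by omega
        have hdrop : u.drop pos = u[pos] :: u.drop (pos + 1) :=
          List.drop_eq_getElem_cons hpos
        have hgetD : u.getD pos ' ' = u[pos] := List.getD_eq_getElem u ' ' hpos
        have hcs : cs.splitOn '*' = s :: ss := hr
        have ihs := ih (pos + 1) (by omega)
        rw [hcs] at ihs
        have hB : bSegLoop u ((c :: s) :: ss) pos =
            if u[pos] :: (u.drop (pos + 1)).take s.length ≠ c :: s then false
            else bSegLoop u ss (pos + 1 + s.length + 1) := by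
          simp only [bSegLoop]
          rw [PySem.List.slice_natCast_add, hdrop]
          simp only [List.length_cons, List.take_succ_cons]
          rw [show pos + (s.length + 1) + 1 = pos + 1 + s.length + 1 from by omega]
        have hB' : bSegLoop u (s :: ss) (pos + 1) =
            if (u.drop (pos + 1)).take s.length ≠ s then false
            else bSegLoop u ss (pos + 1 + s.length + 1) := by
          simp only [bSegLoop]
          rw [PySem.List.slice_natCast_add]
        rw [hB'] at ihs
        rw [hB]
        by_cases h1 : u[pos] :: (u.drop (pos + 1)).take s.length = c :: s
        · rw [if_neg (by simpa using h1)]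
          injection h1 with h1a h1b
          rw [if_neg (by simp [h1b])] at ihs
          rw [ihs]
          constructor
          · intro H j hj
            cases j with
            | zero =>
                refine Or.inr ?_
                simp only [List.getD_cons_zero, Nat.add_zero]
                rw [hgetD, h1a]
            | succ k =>
                simp only [List.getD_cons_succ]
                have := H k (by simpa using hj)
                rwa [show pos + 1 + k = pos + (k + 1) from by omega] at this
          · intro H j hj
            have := H (j + 1) (by simp; omega)
            simp only [List.getD_cons_succ] at this
            rwa [show pos + (j + 1) = pos + 1 + j from by omega] at this
        · rw [if_pos h1]
          simp only [Bool.false_eq_true, false_iff]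
          intro H
          have h0 := H 0 (by simp)
          simp only [List.getD_cons_zero, Nat.add_zero] at h0
          have hc0 : c = u[pos] := by
            rcases h0 with h | h
            · exact absurd h hc
            · rw [hgetD] at h; exact h
          have Hcs : ∀ j < cs.length, cs.getD j ' ' = '*' ∨ cs.getD j ' ' = u.getD (pos + 1 + j) ' ' := by
            intro j hj
            have := H (j + 1) (by simp; omega)
            simp only [List.getD_cons_succ] at this
            rwa [show pos + (j + 1) = pos + 1 + j from by omega] at this
          have hT := ihs.mpr Hcs
          by_cases h2 : (u.drop (pos + 1)).take s.length = s
          · exact h1 (by rw [h2, ← hc0])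
          · rw [if_pos h2] at hT
            exact absurd hT (by simp)

theorem outer_eq (user banned : List String) (n : Nat) : ∀ i,
    aOuter user banned n i = bOuter user banned n i := by
  suffices H : ∀ m i, n - i ≤ m → aOuter user banned n i = bOuter user banned n i by
    intro i; exact H (n - i) i (Nat.le_refl _)
  intro m
  induction m with
  | zero =>
      intro i hm
      have h : ¬ i < n := by omega
      rw [aOuter, bOuter, dif_neg h, dif_neg h]
  | succ m ih =>
      intro i hm
      by_cases h : i < n
      · rw [aOuter, bOuter, dif_pos h, dif_pos h]
        by_cases hl : ((user.getD i "").toList).length ≠ ((banned.getD i "").toList).length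
        · rw [if_pos hl, if_pos hl]
        · rw [if_neg hl, if_neg hl]
          push_neg at hl
          have hpair : aInner ((banned.getD i "").toList) ((user.getD i "").toList) ((banned.getD i "").toList).length 0
              = bSegLoop ((user.getD i "").toList) (((banned.getD i "").toList).splitOn '*') 0 := by
            have h1 := aInner_iff ((banned.getD i "").toList) ((user.getD i "").toList) ((banned.getD i "").toList).length 0
            have h2 := segLoop_iff ((user.getD i "").toList) ((banned.getD i "").toList) 0 (by omega)
            rw [Bool.eq_iff_iff, h1, h2]
            constructor
            · intro H j hj
              have := H j (Nat.zero_le j) hj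
              simpa using this
            · intro H k _ hk
              have := H k hk
              simpa using this
          rw [hpair]
          by_cases hA : bSegLoop ((user.getD i "").toList) (((banned.getD i "").toList).splitOn '*') 0 = true
          · rw [if_pos hA, if_pos hA]
            exact ih (i + 1) (by omega)
          · rw [if_neg hA, if_neg hA]
      · rw [aOuter, bOuter, dif_neg h, dif_neg h]

-- ===== VERDICT (by name: the statement is the Claim_ definition above) =====
theorem is_ban_spec : Claim_equal_is_ban := by
  intro user banned _ _
  unfold Spec_is_ban is_ban is_ban_alt
  exact outer_eq user banned banned.length 0
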